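-- pv_equiv track=rewrite | github.com/wphyojpl/incubator-sdap-nexus | analysis/webservice/algorithms/doms/config.py | get_provider_name
-- ===== SOURCE A (Python) =====
-- INSITU_PROVIDER_MAP = [
--     {
--         'name': 'NCAR',
--         'projects': [
--             {
--                 'name': 'ICOADS Release 3.0',
--                 'platforms': ['0', '16', '17', '30', '41', '42']
--             }
--         ]
--     },
--     {
--         'name': 'Florida State University, COAPS',
--         'projects': [
--             {
--                 'name': 'SAMOS',
--                 'platforms': ['30']
--             }
--         ]
--     },
--     {
--         'name': 'Saildrone',
--         'projects': [
--             {
--                 'name': '1021_atlantic',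
--                 'platforms': ['3B']
--             },
--             {
--                 'name': 'antarctic_circumnavigation_2019',
--                 'platforms': ['3B']
--             },
--             {
--                 'name': 'atlantic_to_med_2019_to_2020',
--                 'platforms': ['3B']
--             },
--             {
--                 'name': 'shark-2018',
--                 'platforms': ['3B']
--             }
--         ]
--     }
-- ]
--
-- ENDPOINTS = [
--     {
--         "name": "samos",
--         "url": "https://doms.coaps.fsu.edu/ws/search/samos_cdms",
--         "fetchParallel": True,
--         "fetchThreads": 8,
--         "itemsPerPage": 1000,
--         "metadataUrl": "http://doms.jpl.nasa.gov/ws/metadata/dataset?shortName=SAMOS&format=umm-json"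
--     },
--     {
--         "name": "spurs",
--         "url": "https://doms.jpl.nasa.gov/ws/search/spurs",
--         "fetchParallel": True,
--         "fetchThreads": 8,
--         "itemsPerPage": 25000,
--         "metadataUrl": "http://doms.jpl.nasa.gov/ws/metadata/dataset?shortName=SPURS-1&format=umm-json"
--     },
--     {
--         "name": "icoads",
--         "url": "http://rda-work.ucar.edu:8890/ws/search/icoads",
--         "fetchParallel": True,
--         "fetchThreads": 8,
--         "itemsPerPage": 1000,
--         "metadataUrl": "http://doms.jpl.nasa.gov/ws/metadata/dataset?shortName=ICOADS&format=umm-json"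
--     },
--     {
--         "name": "spurs2",
--         "url": "https://doms.jpl.nasa.gov/ws/search/spurs2",
--         "fetchParallel": True,
--         "fetchThreads": 8,
--         "itemsPerPage": 25000,
--         "metadataUrl": "http://doms.jpl.nasa.gov/ws/metadata/dataset?shortName=SPURS-2&format=umm-json"
--     }
-- ]
--
-- def get_provider_name(project_name):
--     provider = next((provider for provider in INSITU_PROVIDER_MAP
--                      if project_name in map(lambda project: project['name'], provider['projects'])), None)
--
--     if provider is not None:
--         return provider['name']
--
--     # Check DOMS endpoints as well. Eventually we should remove this so
--     # only CDMS insitu endpoints are used.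
--     provider = next((provider for provider in ENDPOINTS
--                      if provider['name'] == project_name), None)
--     if provider is not None:
--         return provider['name']
-- ===== SOURCE B (Python) =====
-- INSITU_PROVIDER_MAP = [
--     {
--         'name': 'NCAR',
--         'projects': [
--             {'name': 'ICOADS Release 3.0', 'platforms': ['0', '16', '17', '30', '41', '42']}
--         ]
--     },
--     {
--         'name': 'Florida State University, COAPS',
--         'projects': [
--             {'name': 'SAMOS', 'platforms': ['30']}
--         ]
--     },
--     {
--         'name': 'Saildrone',
--         'projects': [
--             {'name': '1021_atlantic', 'platforms': ['3B']},
--             {'name': 'antarctic_circumnavigation_2019', 'platforms': ['3B']},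
--             {'name': 'atlantic_to_med_2019_to_2020', 'platforms': ['3B']},
--             {'name': 'shark-2018', 'platforms': ['3B']}
--         ]
--     }
-- ]
--
-- ENDPOINTS = [
--     {
--         "name": "samos",
--         "url": "https://doms.coaps.fsu.edu/ws/search/samos_cdms",
--         "fetchParallel": True,
--         "fetchThreads": 8,
--         "itemsPerPage": 1000,
--         "metadataUrl": "http://doms.jpl.nasa.gov/ws/metadata/dataset?shortName=SAMOS&format=umm-json"
--     },
--     {
--         "name": "spurs",
--         "url": "https://doms.jpl.nasa.gov/ws/search/spurs",
--         "fetchParallel": True,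
--         "fetchThreads": 8,
--         "itemsPerPage": 25000,
--         "metadataUrl": "http://doms.jpl.nasa.gov/ws/metadata/dataset?shortName=SPURS-1&format=umm-json"
--     },
--     {
--         "name": "icoads",
--         "url": "http://rda-work.ucar.edu:8890/ws/search/icoads",
--         "fetchParallel": True,
--         "fetchThreads": 8,
--         "itemsPerPage": 1000,
--         "metadataUrl": "http://doms.jpl.nasa.gov/ws/metadata/dataset?shortName=ICOADS&format=umm-json"
--     },
--     {
--         "name": "spurs2",
--         "url": "https://doms.jpl.nasa.gov/ws/search/spurs2",
--         "fetchParallel": True,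
--         "fetchThreads": 8,
--         "itemsPerPage": 25000,
--         "metadataUrl": "http://doms.jpl.nasa.gov/ws/metadata/dataset?shortName=SPURS-2&format=umm-json"
--     }
-- ]
--
-- # Flat lookup table, built once: project name -> provider name.
-- # setdefault keeps insitu-provider matches at precedence over endpoint names.
-- _PROJECT_TO_PROVIDER = {}
-- for _provider in INSITU_PROVIDER_MAP:
--     for _project in _provider['projects']:
--         _PROJECT_TO_PROVIDER.setdefault(_project['name'], _provider['name'])
-- for _endpoint in ENDPOINTS:
--     _PROJECT_TO_PROVIDER.setdefault(_endpoint['name'], _endpoint['name'])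
--
--
-- def get_provider_name(project_name):
--     return _PROJECT_TO_PROVIDER.get(project_name)
-- ===== Notes on version B (the rewrite author's own statement) =====
-- stated objective: idiomatic
-- what changed: Replaces the per-call linear scans over INSITU_PROVIDER_MAP (with an inner scan of each provider's projects) and over ENDPOINTS by a flat project-name -> provider-name dict built once at module load; the function is a single dict.get returning None when absent.
import Mathlib
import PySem

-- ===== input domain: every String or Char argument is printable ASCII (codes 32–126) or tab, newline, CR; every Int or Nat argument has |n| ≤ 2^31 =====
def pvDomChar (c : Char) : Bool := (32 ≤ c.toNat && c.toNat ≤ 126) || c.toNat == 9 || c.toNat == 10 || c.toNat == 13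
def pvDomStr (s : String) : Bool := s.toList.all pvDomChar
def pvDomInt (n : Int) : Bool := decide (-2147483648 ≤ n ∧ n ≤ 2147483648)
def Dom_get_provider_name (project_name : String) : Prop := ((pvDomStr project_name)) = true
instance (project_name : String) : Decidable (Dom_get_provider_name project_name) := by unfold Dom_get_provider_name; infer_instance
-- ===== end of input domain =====

-- B replaces A's per-call scans of the two constant tables by a flat name->provider
-- lookup dict built once; same return value, lookup-table decomposition (idiomatic).

-- ===== PORT A =====
-- provider = (name, [project names]); platforms/urls etc. never affect the result
def pvInsituProviderMap : List (String × List String) :=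
  [("NCAR", ["ICOADS Release 3.0"]),
   ("Florida State University, COAPS", ["SAMOS"]),
   ("Saildrone", ["1021_atlantic", "antarctic_circumnavigation_2019",
                  "atlantic_to_med_2019_to_2020", "shark-2018"])]

def pvEndpointNames : List String := ["samos", "spurs", "icoads", "spurs2"]

def get_provider_name (project_name : String) : Option String :=
  -- next((provider for provider in INSITU_PROVIDER_MAP if project_name in map(...)), None)
  match pvInsituProviderMap.find?
      (fun provider => (provider.2.map (fun project => project)).contains project_name) with
  | some provider => some provider.1
  | none =>
    -- next((provider for provider in ENDPOINTS if provider['name'] == project_name), None)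
    match pvEndpointNames.find? (fun provider => provider == project_name) with
    | some provider => some provider
    | none => none

-- ===== PORT B =====
-- _PROJECT_TO_PROVIDER built once with setdefault (insert only if key absent)
def pvSetdefault (d : PySem.Dict String String) (k v : String) : PySem.Dict String String :=
  if d.contains k then d else d.insert k v

def pvProjectToProvider : PySem.Dict String String :=
  let d := pvInsituProviderMap.foldl
    (fun d provider => provider.2.foldl
      (fun d project => pvSetdefault d project provider.1) d)
    PySem.Dict.empty
  pvEndpointNames.foldl (fun d endpoint => pvSetdefault d endpoint endpoint) d

def get_provider_name_alt (project_name : String) : Option String :=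
  pvProjectToProvider.get? project_name

-- ===== PRECONDITION & SPEC =====
def Spec_get_provider_name (project_name : String) (out : Option String) : Prop := out = get_provider_name_alt project_name
instance (project_name : String) (out : Option String) : Decidable (Spec_get_provider_name project_name out) := by unfold Spec_get_provider_name; infer_instance

-- ===== CLAIM (what is proved, stated in full; the proofs are below) =====
def Claim_equal_get_provider_name : Prop := ∀ (project_name : String), Dom_get_provider_name project_name → Spec_get_provider_name project_name (get_provider_name project_name)

-- ===== LEMMAS AND PROOFS =====

def pvFlatTable : List (String × String) :=
  [("ICOADS Release 3.0", "NCAR"),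
   ("SAMOS", "Florida State University, COAPS"),
   ("1021_atlantic", "Saildrone"),
   ("antarctic_circumnavigation_2019", "Saildrone"),
   ("atlantic_to_med_2019_to_2020", "Saildrone"),
   ("shark-2018", "Saildrone"),
   ("samos", "samos"),
   ("spurs", "spurs"),
   ("icoads", "icoads"),
   ("spurs2", "spurs2")]

theorem pvProjectToProvider_eval : pvProjectToProvider = PySem.Dict.mk pvFlatTable := by
  decide

-- ===== VERDICT (by name: the statement is the Claim_ definition above) =====
theorem get_provider_name_spec : Claim_equal_get_provider_name := by
  intro s _
  unfold Spec_get_provider_name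
  unfold get_provider_name get_provider_name_alt pvInsituProviderMap pvEndpointNames
  rw [pvProjectToProvider_eval]
  unfold pvFlatTable
  simp only [List.foldl, List.find?, List.map, List.contains, List.elem,
    PySem.Dict.get?_mk_cons, Bool.or_eq_true, beq_iff_eq]
  by_cases h1 : (s == "ICOADS Release 3.0") = true <;>
  by_cases h2 : (s == "SAMOS") = true <;>
  by_cases h3 : (s == "1021_atlantic") = true <;>
  by_cases h4 : (s == "antarctic_circumnavigation_2019") = true <;>
  by_cases h5 : (s == "atlantic_to_med_2019_to_2020") = true <;>
  by_cases h6 : (s == "shark-2018") = true <;>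
  by_cases h7 : (s == "samos") = true <;>
  by_cases h8 : (s == "spurs") = true <;>
  by_cases h9 : (s == "icoads") = true <;>
  by_cases h10 : (s == "spurs2") = true <;>
  simp_all [Bool.beq_comm]
  simp only [beq_eq_false_iff_ne.mpr h1, beq_eq_false_iff_ne.mpr h2,
    beq_eq_false_iff_ne.mpr h3, beq_eq_false_iff_ne.mpr h4,
    beq_eq_false_iff_ne.mpr h5, beq_eq_false_iff_ne.mpr h6,
    beq_eq_false_iff_ne.mpr h7, beq_eq_false_iff_ne.mpr h8,
    beq_eq_false_iff_ne.mpr h9, beq_eq_false_iff_ne.mpr h10,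
    beq_eq_false_iff_ne.mpr (Ne.symm h1), beq_eq_false_iff_ne.mpr (Ne.symm h2),
    beq_eq_false_iff_ne.mpr (Ne.symm h3), beq_eq_false_iff_ne.mpr (Ne.symm h4),
    beq_eq_false_iff_ne.mpr (Ne.symm h5), beq_eq_false_iff_ne.mpr (Ne.symm h6),
    beq_eq_false_iff_ne.mpr (Ne.symm h7), beq_eq_false_iff_ne.mpr (Ne.symm h8),
    beq_eq_false_iff_ne.mpr (Ne.symm h9), beq_eq_false_iff_ne.mpr (Ne.symm h10)]
  simp only [if_neg (show ¬("ICOADS Release 3.0" = s) from fun q => h1 q.symm), if_neg (show ¬("SAMOS" = s) from fun q => h2 q.symm),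
    if_neg (show ¬("1021_atlantic" = s) from fun q => h3 q.symm), if_neg (show ¬("antarctic_circumnavigation_2019" = s) from fun q => h4 q.symm),
    if_neg (show ¬("atlantic_to_med_2019_to_2020" = s) from fun q => h5 q.symm), if_neg (show ¬("shark-2018" = s) from fun q => h6 q.symm),
    if_neg (show ¬("samos" = s) from fun q => h7 q.symm), if_neg (show ¬("spurs" = s) from fun q => h8 q.symm),
    if_neg (show ¬("icoads" = s) from fun q => h9 q.symm), if_neg (show ¬("spurs2" = s) from fun q => h10 q.symm)]
  simp [PySem.Dict.get?]
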